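-- pv_equiv track=rewrite | github.com/mattyb4/Bio465Capstone | scripts/2_download_structures.py | pick_urls
-- ===== SOURCE A (Python) =====
-- def pick_urls(record: dict, prefer: str = "cif") -> dict[str, str]:
--     urls = [v for v in record.values() if isinstance(v, str) and v.startswith("http")]
--
--     def pick_by_priority(priorities):
--         best_url = ""
--         best_score = -1
--         for u in urls:
--             lu = u.lower()
--             for endings, score in priorities:
--                 if any(lu.endswith(e) for e in endings):
--                     s = score + (1 if lu.endswith(".gz") else 0)
--                     if s > best_score:
--                         best_score = s
--                         best_url = u
--         return best_url
--
--     if prefer == "cif":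
--         structure_url = pick_by_priority([
--             ((".cif.gz", ".cif"), 300),
--             ((".bcif.gz", ".bcif"), 200),
--             ((".pdb.gz", ".pdb"), 100),
--         ])
--     else:
--         structure_url = pick_by_priority([
--             ((".pdb.gz", ".pdb"), 300),
--             ((".cif.gz", ".cif"), 200),
--             ((".bcif.gz", ".bcif"), 100),
--         ])
--     pae_url = record.get("paeDocUrl", "") or pick_by_priority([
--         ((".pae.json.gz", ".pae.json"), 300),
--     ])
--     return {"structure_url": structure_url, "pae_url": pae_url}
-- ===== SOURCE B (Python) =====
-- def pick_urls(record: dict, prefer: str = "cif") -> dict[str, str]: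
--     urls = [v for v in record.values() if isinstance(v, str) and v.startswith("http")]
--
--     def score(lu, table):
--         matched = [base for suf, base in table if lu.endswith(suf)]
--         if not matched:
--             return None
--         return max(matched) + (1 if lu.endswith(".gz") else 0)
--
--     def best(table):
--         scored = [(u, s) for u in urls for s in [score(u.lower(), table)] if s is not None]
--         if not scored:
--             return ""
--         top = max(s for _, s in scored)
--         return next(u for u, s in scored if s == top)
--
--     if prefer == "cif":
--         table = [(".cif.gz", 300), (".cif", 300), (".bcif.gz", 200), (".bcif", 200),
--                  (".pdb.gz", 100), (".pdb", 100)]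
--     else:
--         table = [(".pdb.gz", 300), (".pdb", 300), (".cif.gz", 200), (".cif", 200),
--                  (".bcif.gz", 100), (".bcif", 100)]
--     structure_url = best(table)
--     pae_url = record.get("paeDocUrl", "") or best([(".pae.json.gz", 300), (".pae.json", 300)])
--     return {"structure_url": structure_url, "pae_url": pae_url}
-- ===== Notes on version B (the rewrite author's own statement) =====
-- stated objective: simpler
-- what changed: A's nested best-tracking scan over priority groups is replaced by a flat suffix-to-score table, a single scored-URL list, and a first-argmax selection (max then first match), reusing one scoring helper for both the structure and PAE picks.
import Mathlib
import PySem

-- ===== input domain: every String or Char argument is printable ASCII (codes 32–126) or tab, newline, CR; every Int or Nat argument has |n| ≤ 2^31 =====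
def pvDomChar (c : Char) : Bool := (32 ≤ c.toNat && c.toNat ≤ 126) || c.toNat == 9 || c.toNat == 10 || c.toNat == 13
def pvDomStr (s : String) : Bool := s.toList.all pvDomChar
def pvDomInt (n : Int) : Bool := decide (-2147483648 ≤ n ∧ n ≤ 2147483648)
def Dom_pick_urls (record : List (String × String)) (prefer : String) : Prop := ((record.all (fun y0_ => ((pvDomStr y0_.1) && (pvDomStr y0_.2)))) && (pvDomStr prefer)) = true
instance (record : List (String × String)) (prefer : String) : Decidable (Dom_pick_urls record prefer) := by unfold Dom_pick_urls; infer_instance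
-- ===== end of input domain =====

-- B replaces A's nested best-tracking loop by a suffix→score table, a scored url list
-- and a first-argmax selection; objective: simpler decomposition (no speed claim).

-- ===== PORT A =====
-- A's inner `for endings, score in priorities` loop body, one url (endings is a 2-tuple)
def pvStepA (priorities : List ((String × String) × Int)) (st : String × Int) (u : String) : String × Int :=
  let lu := PySem.Str.lower u
  priorities.foldl (fun st p =>
    if PySem.Str.endswith lu p.1.1 || PySem.Str.endswith lu p.1.2 then
      let s := p.2 + (if PySem.Str.endswith lu ".gz" then 1 else 0)
      if s > st.2 then (u, s) else st
    else st) st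

-- A's `pick_by_priority`
def pvPickA (urls : List String) (priorities : List ((String × String) × Int)) : String :=
  (urls.foldl (pvStepA priorities) ("", -1)).1

def pick_urls (record : List (String × String)) (prefer : String) : List (String × String) :=
  let d := PySem.Dict.ofList record
  let urls := d.values.filter (fun v => PySem.Str.startswith v "http")
  let structure_url :=
    if prefer == "cif" then
      pvPickA urls [((".cif.gz", ".cif"), 300), ((".bcif.gz", ".bcif"), 200), ((".pdb.gz", ".pdb"), 100)]
    else
      pvPickA urls [((".pdb.gz", ".pdb"), 300), ((".cif.gz", ".cif"), 200), ((".bcif.gz", ".bcif"), 100)]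
  let pae0 := d.getD "paeDocUrl" ""
  -- Python `x or y` on strings: y when x is empty
  let pae_url := if pae0 == "" then pvPickA urls [((".pae.json.gz", ".pae.json"), 300)] else pae0
  [("structure_url", structure_url), ("pae_url", pae_url)]

-- ===== PORT B =====
-- Source B `score`: max base of the matching table suffixes, +1 for .gz; None if no suffix matches
def pvScoreB (lu : String) (table : List (String × Int)) : Option Int :=
  let matched := table.filterMap (fun p => if PySem.Str.endswith lu p.1 then some p.2 else none)
  match PySem.List.max? matched (fun x => x) with
  | none => none
  | some m => some (m + (if PySem.Str.endswith lu ".gz" then 1 else 0))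

-- Source B `best`: scored url list, then the first url attaining the maximal score
def pvBestB (urls : List String) (table : List (String × Int)) : String :=
  let scored := urls.filterMap (fun u => (pvScoreB (PySem.Str.lower u) table).map (fun s => (u, s)))
  match PySem.List.max? (scored.map (·.2)) (fun x => x) with
  | none => ""
  | some top => ((scored.find? (fun p => p.2 == top)).map (·.1)).getD ""
    -- `next(...)`: the maximum is attained, so find? always succeeds; getD "" is unreachable

def pick_urls_alt (record : List (String × String)) (prefer : String) : List (String × String) :=
  let d := PySem.Dict.ofList record
  let urls := d.values.filter (fun v => PySem.Str.startswith v "http")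
  let table :=
    if prefer == "cif" then
      [(".cif.gz", (300 : Int)), (".cif", 300), (".bcif.gz", 200), (".bcif", 200), (".pdb.gz", 100), (".pdb", 100)]
    else
      [(".pdb.gz", (300 : Int)), (".pdb", 300), (".cif.gz", 200), (".cif", 200), (".bcif.gz", 100), (".bcif", 100)]
  let structure_url := pvBestB urls table
  let pae0 := d.getD "paeDocUrl" ""
  let pae_url := if pae0 == "" then pvBestB urls [(".pae.json.gz", 300), (".pae.json", 300)] else pae0
  [("structure_url", structure_url), ("pae_url", pae_url)]

-- ===== PRECONDITION & SPEC =====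
def Spec_pick_urls (record : List (String × String)) (prefer : String) (out : List (String × String)) : Prop := out = pick_urls_alt record prefer
instance (record : List (String × String)) (prefer : String) (out : List (String × String)) : Decidable (Spec_pick_urls record prefer out) := by unfold Spec_pick_urls; infer_instance

-- ===== CLAIM (what is proved, stated in full; the proofs are below) =====
def Claim_equal_pick_urls : Prop := ∀ (record : List (String × String)) (prefer : String), Dom_pick_urls record prefer → Spec_pick_urls record prefer (pick_urls record prefer)

-- ===== LEMMAS AND PROOFS =====

-- A's per-url step equals "compare B's score of this url with the running best" (concrete tables)
theorem foldl_max_proj_eq (scored : List (String × Int)) (b : Int) :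
    scored.foldl (fun a p => max a p.2) b = (scored.map (·.2)).foldl max b := by
  rw [List.foldl_map]

theorem find?_top_isSome (scored : List (String × Int)) (b top : Int)
    (htop : top = scored.foldl (fun a p => max a p.2) b) (hne : top ≠ b) :
    ∃ q, scored.find? (fun p => p.2 == top) = some q := by
  have hmem : top = b ∨ top ∈ scored.map (·.2) := by
    rw [htop, foldl_max_proj_eq]
    exact PySem.List.foldl_max_mem _ _
  rcases hmem with h | h
  · exact absurd h hne
  · rcases List.mem_map.mp h with ⟨q, hq, hq2⟩
    have : ∃ q ∈ scored, (fun p => p.2 == top) q = true := ⟨q, hq, by simp [hq2]⟩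
    rcases List.find?_isSome.mpr this with h'
    rcases Option.isSome_iff_exists.mp h' with ⟨q', hq'⟩
    exact ⟨q', hq'⟩

-- the central induction: A's best-tracking fold computes the first argmax of B's scored list
theorem fold_char (table : List (String × Int))
    (step : String × Int → String → String × Int)
    (hstep : ∀ st u, step st u =
      match pvScoreB (PySem.Str.lower u) table with
      | none => st
      | some s => if s > st.2 then (u, s) else st) :
    ∀ (urls : List String) (bu : String) (bs : Int),
      urls.foldl step (bu, bs) =
      (let scored := urls.filterMap (fun u => (pvScoreB (PySem.Str.lower u) table).map (fun s => (u, s)))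
       let top := scored.foldl (fun a p => max a p.2) bs
       (if bs < top then ((scored.find? (fun p => p.2 == top)).map (·.1)).getD bu else bu, top)) := by
  intro urls
  induction urls with
  | nil => intro bu bs; simp
  | cons u rest ih =>
    intro bu bs
    simp only [List.foldl_cons, hstep, List.filterMap_cons]
    cases hscore : pvScoreB (PySem.Str.lower u) table with
    | none => simpa using ih bu bs
    | some s =>
      simp only [Option.map_some]
      by_cases hs : s > bs
      · have hmax : max bs s = s := by omega
        rw [if_pos hs, ih u s]
        simp only [List.foldl_cons, hmax]
        set scored := rest.filterMap (fun u => (pvScoreB (PySem.Str.lower u) table).map (fun s => (u, s))) with hscoredef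
        set top := scored.foldl (fun a p => max a p.2) s with htopdef
        have hle : s ≤ top := by
          rw [htopdef, foldl_max_proj_eq]; exact (PySem.List.le_foldl_max _ _).1
        by_cases hlt : s < top
        · rcases find?_top_isSome scored s top htopdef (by omega) with ⟨q, hq⟩
          have hbs : bs < top := by omega
          rw [if_pos hlt, if_pos hbs,
            List.find?_cons_of_neg (p := fun (p : String × Int) => p.2 == top) (a := (u, s)) (by simp; omega), hq]
          simp
        · have htops : top = s := by omega
          have hbs : bs < top := by omega
          rw [if_neg hlt, if_pos hbs,
            List.find?_cons_of_pos (p := fun (p : String × Int) => p.2 == top) (l := scored) (by simp [htops])]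
          rfl
      · have hmax : max bs s = bs := by omega
        rw [if_neg hs, ih bu bs]
        simp only [List.foldl_cons, hmax]
        set scored := rest.filterMap (fun u => (pvScoreB (PySem.Str.lower u) table).map (fun s => (u, s))) with hscoredef
        set top := scored.foldl (fun a p => max a p.2) bs with htopdef
        by_cases hbs : bs < top
        · rw [if_pos hbs, if_pos hbs,
            List.find?_cons_of_neg (p := fun (p : String × Int) => p.2 == top) (a := (u, s)) (by simp; omega)]
        · rw [if_neg hbs, if_neg hbs]

-- every score B produces from a table of nonnegative bases is nonnegative
theorem scoreB_nonneg (lu : String) (table : List (String × Int))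
    (hpos : ∀ p ∈ table, 0 ≤ p.2) (s : Int)
    (h : pvScoreB lu table = some s) : 0 ≤ s := by
  simp only [pvScoreB] at h
  cases hm : PySem.List.max? (table.filterMap (fun p => if PySem.Str.endswith lu p.1 then some p.2 else none)) (fun x => x) with
  | none => rw [hm] at h; simp at h
  | some m =>
    rw [hm] at h
    simp only [Option.some.injEq] at h
    have hmem := PySem.List.max?_mem hm
    rcases List.mem_filterMap.mp hmem with ⟨p, hp, hpe⟩
    have : 0 ≤ m := by
      by_cases he : PySem.Str.endswith lu p.1
      · rw [if_pos he] at hpe; simp at hpe; subst hpe; exact hpos p hp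
      · rw [if_neg he] at hpe; simp at hpe
    subst h; split <;> omega

-- the per-table bridge: A's pick_by_priority = B's table-scored first argmax
theorem pick_eq (urls : List String) (prios : List ((String × String) × Int)) (table : List (String × Int))
    (hpos : ∀ p ∈ table, 0 ≤ p.2)
    (hstep : ∀ st u, pvStepA prios st u =
      match pvScoreB (PySem.Str.lower u) table with
      | none => st
      | some s => if s > st.2 then (u, s) else st) :
    pvPickA urls prios = pvBestB urls table := by
  unfold pvPickA pvBestB
  rw [fold_char table (pvStepA prios) hstep urls "" (-1)]
  set scored := urls.filterMap (fun u => (pvScoreB (PySem.Str.lower u) table).map (fun s => (u, s))) with hscoredef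
  have hposs : ∀ q ∈ scored, 0 ≤ q.2 := by
    intro q hq
    rcases List.mem_filterMap.mp hq with ⟨u, hu, he⟩
    cases hsc : pvScoreB (PySem.Str.lower u) table with
    | none => rw [hsc] at he; simp at he
    | some s =>
      rw [hsc] at he
      rcases Option.map_eq_some_iff.mp he with ⟨s', hs', rfl⟩
      cases hs'
      exact scoreB_nonneg (PySem.Str.lower u) table hpos s hsc
  cases hsc : scored with
  | nil => simp [PySem.List.max?]
  | cons q qs =>
    have hq0 : 0 ≤ q.2 := hposs q (by rw [hsc]; exact List.mem_cons_self)
    have hmax : PySem.List.max? ((q :: qs).map (·.2)) (fun x => x) = some ((qs.map (·.2)).foldl max q.2) := by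
      simp only [List.map_cons]
      exact PySem.List.max?_id_cons _ _
    have hfold : (q :: qs).foldl (fun a p => max a p.2) (-1) = (qs.map (·.2)).foldl max q.2 := by
      rw [foldl_max_proj_eq]
      simp only [List.map_cons, List.foldl_cons]
      congr 1
      omega
    have htople : q.2 ≤ (qs.map (·.2)).foldl max q.2 := (PySem.List.le_foldl_max _ _).1
    have hbs : (-1 : Int) < (qs.map (·.2)).foldl max q.2 := by omega
    simp only [hmax, hfold, hbs, if_pos]

-- running max pulled out of a foldl
theorem foldl_max_max (l : List Int) : ∀ (a b : Int), l.foldl max (max a b) = max a (l.foldl max b) := by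
  induction l with
  | nil => intro a b; rfl
  | cons q t ih =>
    intro a b
    simp only [List.foldl_cons, max_assoc, ih]

-- A's inner priority-group loop equals "match the max of the matching flattened-table bases"
theorem inner_main (u : String) (g : Int) (ew : String → Bool) :
    ∀ (prios : List ((String × String) × Int)) (st : String × Int),
    prios.foldl (fun st p =>
        if ew p.1.1 || ew p.1.2 then
          (if p.2 + g > st.2 then (u, p.2 + g) else st)
        else st) st
    = match PySem.List.max?
        ((prios.flatMap (fun p => [(p.1.1, p.2), (p.1.2, p.2)])).filterMap
          (fun q => if ew q.1 then some q.2 else none)) (fun x => x) with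
      | none => st
      | some m => if m + g > st.2 then (u, m + g) else st := by
  intro prios
  induction prios with
  | nil => intro st; rfl
  | cons p rest ih =>
    intro st
    simp only [List.foldl_cons, List.flatMap_cons, List.cons_append, List.nil_append,
      List.filterMap_cons]
    cases hb1 : ew p.1.1 <;> cases hb2 : ew p.1.2 <;>
      simp only [Bool.or_true, Bool.or_false, if_true, if_false, ite_true, ite_false, hb1, hb2] <;>
      rw [ih]
    case false.false => rfl
    all_goals
      cases hms : ((rest.flatMap (fun p => [(p.1.1, p.2), (p.1.2, p.2)])).filterMap
          (fun q => if ew q.1 then some q.2 else none)) with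
      | nil =>
        simp only [hb1, hb2, Bool.false_eq_true, ite_true, ite_false,
          PySem.List.max?_id_cons, List.foldl_nil, List.foldl_cons, max_self]
        split_ifs <;> rfl
      | cons q qs =>
        simp only [hb1, hb2, Bool.false_eq_true, ite_true, ite_false,
          PySem.List.max?_id_cons, List.foldl_cons, max_self, foldl_max_max]
        rcases max_cases p.2 (qs.foldl max q) with ⟨hmx, hle⟩ | ⟨hmx, hle⟩ <;>
          simp only [hmx] <;> split_ifs <;> first | rfl | omega

-- hstep for the four concrete (priorities, table) pairs, via inner_main
theorem hstep_cif : ∀ (st : String × Int) (u : String),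
    pvStepA [((".cif.gz", ".cif"), 300), ((".bcif.gz", ".bcif"), 200), ((".pdb.gz", ".pdb"), 100)] st u =
    match pvScoreB (PySem.Str.lower u) [(".cif.gz", (300 : Int)), (".cif", 300), (".bcif.gz", 200), (".bcif", 200), (".pdb.gz", 100), (".pdb", 100)] with
    | none => st
    | some s => if s > st.2 then (u, s) else st := by
  intro st u
  simp only [pvStepA, pvScoreB]
  rw [inner_main u (if PySem.Str.endswith (PySem.Str.lower u) ".gz" then (1 : Int) else 0)
    (fun e => PySem.Str.endswith (PySem.Str.lower u) e)
    [((".cif.gz", ".cif"), 300), ((".bcif.gz", ".bcif"), 200), ((".pdb.gz", ".pdb"), 100)] st]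
  simp only [List.flatMap_cons, List.flatMap_nil, List.cons_append, List.nil_append, List.append_nil]
  cases hX : PySem.List.max? ([(".cif.gz", (300 : Int)), (".cif", 300), (".bcif.gz", 200), (".bcif", 200), (".pdb.gz", 100), (".pdb", 100)].filterMap
      (fun q => if PySem.Str.endswith (PySem.Str.lower u) q.1 then some q.2 else none)) (fun x => x) <;> rfl

theorem hstep_pdb : ∀ (st : String × Int) (u : String),
    pvStepA [((".pdb.gz", ".pdb"), 300), ((".cif.gz", ".cif"), 200), ((".bcif.gz", ".bcif"), 100)] st u =
    match pvScoreB (PySem.Str.lower u) [(".pdb.gz", (300 : Int)), (".pdb", 300), (".cif.gz", 200), (".cif", 200), (".bcif.gz", 100), (".bcif", 100)] with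
    | none => st
    | some s => if s > st.2 then (u, s) else st := by
  intro st u
  simp only [pvStepA, pvScoreB]
  rw [inner_main u (if PySem.Str.endswith (PySem.Str.lower u) ".gz" then (1 : Int) else 0)
    (fun e => PySem.Str.endswith (PySem.Str.lower u) e)
    [((".pdb.gz", ".pdb"), 300), ((".cif.gz", ".cif"), 200), ((".bcif.gz", ".bcif"), 100)] st]
  simp only [List.flatMap_cons, List.flatMap_nil, List.cons_append, List.nil_append, List.append_nil]
  cases hX : PySem.List.max? ([(".pdb.gz", (300 : Int)), (".pdb", 300), (".cif.gz", 200), (".cif", 200), (".bcif.gz", 100), (".bcif", 100)].filterMap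
      (fun q => if PySem.Str.endswith (PySem.Str.lower u) q.1 then some q.2 else none)) (fun x => x) <;> rfl

theorem hstep_pae : ∀ (st : String × Int) (u : String),
    pvStepA [((".pae.json.gz", ".pae.json"), 300)] st u =
    match pvScoreB (PySem.Str.lower u) [(".pae.json.gz", (300 : Int)), (".pae.json", 300)] with
    | none => st
    | some s => if s > st.2 then (u, s) else st := by
  intro st u
  simp only [pvStepA, pvScoreB]
  rw [inner_main u (if PySem.Str.endswith (PySem.Str.lower u) ".gz" then (1 : Int) else 0)
    (fun e => PySem.Str.endswith (PySem.Str.lower u) e)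
    [((".pae.json.gz", ".pae.json"), 300)] st]
  simp only [List.flatMap_cons, List.flatMap_nil, List.cons_append, List.nil_append, List.append_nil]
  cases hX : PySem.List.max? ([(".pae.json.gz", (300 : Int)), (".pae.json", 300)].filterMap
      (fun q => if PySem.Str.endswith (PySem.Str.lower u) q.1 then some q.2 else none)) (fun x => x) <;> rfl

-- ===== VERDICT (by name: the statement is the Claim_ definition above) =====
theorem pick_urls_spec : Claim_equal_pick_urls := by
  intro record prefer _
  unfold Spec_pick_urls pick_urls pick_urls_alt
  simp only []
  set urls := (PySem.Dict.ofList record).values.filter (fun v => PySem.Str.startswith v "http")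
  have hcif := pick_eq urls _ _ (by decide) hstep_cif
  have hpdb := pick_eq urls _ _ (by decide) hstep_pdb
  have hpae := pick_eq urls _ _ (by decide) hstep_pae
  by_cases hp : prefer == "cif" <;> simp [hp, hcif, hpdb, hpae]
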